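-- pv_equiv track=rewrite | github.com/JohanSchott/impurityModel | product_state_representation.py | tuple2binary
-- ===== SOURCE A (Python) =====
-- def tuple2binary(t, n):
--     """
--     Returns binary string representation of product state.
--
--     Parameters
--     ----------
--     t : tuple
--         Product state.
--     n : int
--         Total number of spin-orbitals in the system.
--
--     """
--     s = ""
--     for i in range(n):
--         if i in t:
--             s += "1"
--         else:
--             s+= "0"
--     return s
-- ===== SOURCE B (Python) =====
-- def tuple2binary(t, n):
--     b = ["0"] * n
--     for j in t:
--         if 0 <= j < n:
--             b[j] = "1"
--     return "".join(b)
-- ===== Notes on version B (the rewrite author's own statement) =====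
-- stated objective: faster
-- what changed: B scatters marks by index into a preallocated char list over the elements of t and joins once, instead of scanning every position in range(n) and doing a membership test in t for each.
import Mathlib
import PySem

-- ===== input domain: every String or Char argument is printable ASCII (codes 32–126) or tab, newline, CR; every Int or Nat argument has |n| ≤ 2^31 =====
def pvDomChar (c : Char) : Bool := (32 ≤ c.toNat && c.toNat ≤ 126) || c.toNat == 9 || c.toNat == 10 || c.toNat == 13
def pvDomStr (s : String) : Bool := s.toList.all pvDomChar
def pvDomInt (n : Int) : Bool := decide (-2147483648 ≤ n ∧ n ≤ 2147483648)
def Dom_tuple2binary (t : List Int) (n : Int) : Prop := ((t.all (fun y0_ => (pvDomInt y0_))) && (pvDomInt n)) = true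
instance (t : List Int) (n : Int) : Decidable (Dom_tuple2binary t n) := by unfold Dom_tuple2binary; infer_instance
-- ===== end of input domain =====

-- B replaces A's scan of every position (with a membership test in t at each) by a
-- single scatter over t into a preallocated '0'-list, joined once (objective: faster).

-- ===== PORT A =====
def tuple2binary (t : List Int) (n : Int) : String :=
  (PySem.List.pyRange 0 n 1).foldl
    (fun s i => s ++ (if t.contains i then "1" else "0")) ""

-- ===== PORT B =====
def tuple2binary_alt (t : List Int) (n : Int) : String :=
  String.ofList
    (t.foldl
      (fun b j => if 0 ≤ j ∧ j < n then b.set j.toNat '1' else b)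
      (List.replicate n.toNat '0'))

-- ===== PRECONDITION & SPEC =====
def Spec_tuple2binary (t : List Int) (n : Int) (out : String) : Prop := out = tuple2binary_alt t n
instance (t : List Int) (n : Int) (out : String) : Decidable (Spec_tuple2binary t n out) := by unfold Spec_tuple2binary; infer_instance

-- ===== CLAIM (what is proved, stated in full; the proofs are below) =====
def Claim_equal_tuple2binary : Prop := ∀ (t : List Int) (n : Int), Dom_tuple2binary t n → Spec_tuple2binary t n (tuple2binary t n)

-- ===== LEMMAS AND PROOFS =====

-- A's loop, as a char list: position i gets '1' iff i ∈ t.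
theorem pv_foldA (t : List Int) (l : List Int) (s : String) :
    (l.foldl (fun s i => s ++ (if t.contains i then "1" else "0")) s).toList
      = s.toList ++ l.map (fun i => if t.contains i then '1' else '0') := by
  induction l generalizing s with
  | nil => simp
  | cons j l ih =>
      simp only [List.foldl_cons, ih, List.map_cons]
      by_cases h : j ∈ t <;> simp [h]

-- B's scatter over t applied to a mapped range: updates the base function pointwise.
theorem pv_foldB (t : List Int) (n : Int) (g : Nat → Char) :
    t.foldl (fun b j => if 0 ≤ j ∧ j < n then b.set j.toNat '1' else b)
        ((List.range n.toNat).map g)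
      = (List.range n.toNat).map (fun (i : Nat) => if t.contains (i : Int) then '1' else g i) := by
  induction t generalizing g with
  | nil => simp
  | cons j t ih =>
      simp only [List.foldl_cons]
      by_cases h : 0 ≤ j ∧ j < n
      · have hset : ((List.range n.toNat).map g).set j.toNat '1'
            = (List.range n.toNat).map (fun i => if i = j.toNat then '1' else g i) := by
          apply List.ext_getElem
          · simp
          · intro i h1 h2
            simp only [List.length_set, List.length_map, List.length_range] at h1
            rw [List.getElem_set]
            simp only [List.getElem_map, List.getElem_range]
            by_cases hij : j.toNat = i
            · simp [hij]
            · have hij' : ¬ i = j.toNat := fun hh => hij hh.symm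
              simp [hij, hij']
        rw [if_pos h, hset, ih]
        apply List.map_congr_left
        intro i hi
        have hi' : i < n.toNat := List.mem_range.mp hi
        by_cases hm : (i : Int) ∈ t
        · simp [hm]
        · by_cases hij : i = j.toNat
          · have hj : (i : Int) = j := by omega
            rw [if_neg (show ¬ (t.contains (↑i : Int)) = true by simpa using hm), if_pos hij,
              if_pos (show ((j :: t).contains (↑i : Int)) = true by simp [hj])]
          · have hj : (i : Int) ≠ j := by omega
            rw [if_neg (show ¬ (t.contains (↑i : Int)) = true by simpa using hm), if_neg hij,
              if_neg (show ¬ ((j :: t).contains (↑i : Int)) = true by simp [hj, hm])]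
      · rw [if_neg h, ih]
        apply List.map_congr_left
        intro i hi
        have hi' : i < n.toNat := List.mem_range.mp hi
        have hne : (i : Int) ≠ j := by omega
        simp [hne]

theorem tuple2binary_spec : Claim_equal_tuple2binary := by
  unfold Claim_equal_tuple2binary
  intro t n _
  unfold Spec_tuple2binary tuple2binary tuple2binary_alt
  have hrep : List.replicate n.toNat '0' = (List.range n.toNat).map (fun _ => '0') := by
    simp [List.map_const']
  rw [hrep, pv_foldB]
  apply String.ext
  show _ = (String.ofList _).toList
  rw [pv_foldA]
  rw [PySem.List.pyRange_one]
  simp [List.map_map, Function.comp]
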